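-- pv_equiv track=rewrite | github.com/BigRantLing/LeetCodeSolutions | src/rantling/exchange_cokes.py | exchange_cokes
-- ===== SOURCE A (Python) =====
-- def exchange_cokes(empty_bottles: int):
--     if empty_bottles == 2:
--         return 1
--     if empty_bottles < 2:
--         return 0
--
--     cokes = empty_bottles // 3
--     cokes += exchange_cokes(empty_bottles % 3 + cokes)
--
--     return cokes
-- ===== SOURCE B (Python) =====
-- def exchange_cokes(empty_bottles: int):
--     total = 0
--     empty = empty_bottles
--     while True:
--         if empty == 2:
--             return total + 1
--         if empty < 2:
--             return total
--         c = empty // 3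
--         total += c
--         empty = empty % 3 + c
-- ===== Notes on version B (the rewrite author's own statement) =====
-- stated objective: simpler
-- what changed: Replaced A's self-recursive accumulation with an iterative while-loop keeping a running total and the current empty-bottle count.
import Mathlib
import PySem

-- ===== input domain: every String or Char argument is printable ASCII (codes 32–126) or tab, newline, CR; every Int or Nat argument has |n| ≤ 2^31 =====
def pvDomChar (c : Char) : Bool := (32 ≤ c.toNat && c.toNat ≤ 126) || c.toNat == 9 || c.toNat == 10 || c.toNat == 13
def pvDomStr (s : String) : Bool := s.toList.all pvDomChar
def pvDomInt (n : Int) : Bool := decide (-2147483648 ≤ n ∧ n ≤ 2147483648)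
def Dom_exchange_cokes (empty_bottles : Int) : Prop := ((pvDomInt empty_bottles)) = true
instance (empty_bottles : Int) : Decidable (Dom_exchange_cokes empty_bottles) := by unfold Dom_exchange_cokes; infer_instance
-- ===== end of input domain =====

-- B replaces A's self-recursive accumulation with an iterative loop carrying a running total (same values; objective: simpler).

-- ===== PORT A =====
def exchange_cokes (empty_bottles : Int) : Int :=
  if empty_bottles = 2 then 1
  else if empty_bottles < 2 then 0
  else
    let cokes := PySem.Int.floordiv empty_bottles 3
    cokes + exchange_cokes (PySem.Int.mod empty_bottles 3 + cokes)
termination_by empty_bottles.toNat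
decreasing_by
  rw [PySem.Int.floordiv_eq_ediv_of_pos (by norm_num), PySem.Int.mod_eq_emod_of_pos (by norm_num)]
  omega

-- ===== PORT B =====
-- the while-loop of Source B, with loop state (total, empty)
def exchange_cokes_alt_go (total empty : Int) : Int :=
  if empty = 2 then total + 1
  else if empty < 2 then total
  else
    let c := PySem.Int.floordiv empty 3
    exchange_cokes_alt_go (total + c) (PySem.Int.mod empty 3 + c)
termination_by empty.toNat
decreasing_by
  rw [PySem.Int.floordiv_eq_ediv_of_pos (by norm_num), PySem.Int.mod_eq_emod_of_pos (by norm_num)]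
  omega

def exchange_cokes_alt (empty_bottles : Int) : Int :=
  exchange_cokes_alt_go 0 empty_bottles

-- ===== PRECONDITION & SPEC =====
def Spec_exchange_cokes (empty_bottles : Int) (out : Int) : Prop := out = exchange_cokes_alt empty_bottles
instance (empty_bottles : Int) (out : Int) : Decidable (Spec_exchange_cokes empty_bottles out) := by unfold Spec_exchange_cokes; infer_instance

-- ===== CLAIM (what is proved, stated in full; the proofs are below) =====
def Claim_equal_exchange_cokes : Prop := ∀ (empty_bottles : Int), Dom_exchange_cokes empty_bottles → Spec_exchange_cokes empty_bottles (exchange_cokes empty_bottles)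

-- ===== LEMMAS AND PROOFS =====

-- loop invariant: the iterative loop accumulates exactly A's recursive value
theorem exchange_cokes_alt_go_eq (total empty : Int) :
    exchange_cokes_alt_go total empty = total + exchange_cokes empty := by
  fun_induction exchange_cokes_alt_go total empty <;> rw [exchange_cokes] <;> simp_all
  rename_i total empty hne c hlt ih
  have hc : c = empty / 3 := PySem.Int.floordiv_eq_ediv_of_pos (by norm_num)
  rw [if_neg (show ¬ empty ≤ (1:Int) by omega), hc, Int.add_comm (empty % 3) (empty / 3)]
  ring

-- ===== VERDICT (by name: the statement is the Claim_ definition above) =====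
theorem exchange_cokes_spec : Claim_equal_exchange_cokes := by
  intro e _
  unfold Spec_exchange_cokes exchange_cokes_alt
  rw [exchange_cokes_alt_go_eq]
  ring
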